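-- pv_equiv track=rewrite | github.com/kieranpjobrien/nas-av1-pipeline | pipeline/qualify.py | _languages_equivalent
-- ===== SOURCE A (Python) =====
-- _ISO1_EQUIV: dict[str, set[str]] = {
--     "en": {"en", "eng", "english"},
--     "sv": {"sv", "swe", "swedish"},
--     "nl": {"nl", "nld", "dut", "dutch"},
--     "de": {"de", "deu", "ger", "german"},
--     "fr": {"fr", "fra", "fre", "french"},
--     "es": {"es", "spa", "spanish"},
--     "it": {"it", "ita", "italian"},
--     "ja": {"ja", "jpn", "japanese"},
--     "ko": {"ko", "kor", "korean"},
--     # Chinese is genuinely ambiguous on tags (Mandarin vs Cantonese vs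
--     # generic). TMDb uses cn (legacy) and zh; whisper returns zh. MKV tags
--     # are chi/zho/yue/cmn. Treat them as one bucket for the foreign-audio
--     # check — if any of them are present and TMDb says zh-anything, the
--     # file's "in original language" enough.
--     "zh": {"zh", "cn", "chi", "zho", "yue", "cmn", "chinese", "mandarin", "cantonese"},
--     "pt": {"pt", "por", "portuguese"},
--     "ru": {"ru", "rus", "russian"},
--     "ar": {"ar", "ara", "arabic"},
--     "hi": {"hi", "hin", "hindi"},
--     "no": {"no", "nor", "norwegian"},
--     "da": {"da", "dan", "danish"},
--     "fi": {"fi", "fin", "finnish"},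
--     "pl": {"pl", "pol", "polish"},
--     "cs": {"cs", "ces", "cze", "czech"},
--     "tr": {"tr", "tur", "turkish"},
--     "he": {"he", "heb", "hebrew"},
--     "th": {"th", "tha", "thai"},
--     "vi": {"vi", "vie", "vietnamese"},
--     "el": {"el", "ell", "gre", "greek"},
-- }
--
-- def _languages_equivalent(a: str, b: str) -> bool:
--     """True if a and b refer to the same language under ISO 639-1/2 conventions.
--
--     Whisper produces 2-letter codes; TMDb returns 2-letter; MKV stream tags
--     are typically 3-letter. This handles the cross-mapping. Empty / und
--     / unk values are NEVER equivalent to anything.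
--     """
--     a, b = a.lower().strip(), b.lower().strip()
--     if not a or not b or a in {"und", "unk"} or b in {"und", "unk"}:
--         return False
--     if a == b:
--         return True
--     for codes in _ISO1_EQUIV.values():
--         if a in codes and b in codes:
--             return True
--     return False
-- ===== SOURCE B (Python) =====
-- # Canonicalization table written flat: each code maps straight to its canonical
-- # ISO 639-1 language; two codes are equivalent iff they canonicalize identically.
-- _CODE_TO_LANG: dict[str, str] = {
--     "en": "en",
--     "eng": "en",
--     "english": "en",
--     "sv": "sv",
--     "swe": "sv",
--     "swedish": "sv",
--     "nl": "nl",
--     "nld": "nl",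
--     "dut": "nl",
--     "dutch": "nl",
--     "de": "de",
--     "deu": "de",
--     "ger": "de",
--     "german": "de",
--     "fr": "fr",
--     "fra": "fr",
--     "fre": "fr",
--     "french": "fr",
--     "es": "es",
--     "spa": "es",
--     "spanish": "es",
--     "it": "it",
--     "ita": "it",
--     "italian": "it",
--     "ja": "ja",
--     "jpn": "ja",
--     "japanese": "ja",
--     "ko": "ko",
--     "kor": "ko",
--     "korean": "ko",
--     "zh": "zh",
--     "cn": "zh",
--     "chi": "zh",
--     "zho": "zh",
--     "yue": "zh",
--     "cmn": "zh",
--     "chinese": "zh",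
--     "mandarin": "zh",
--     "cantonese": "zh",
--     "pt": "pt",
--     "por": "pt",
--     "portuguese": "pt",
--     "ru": "ru",
--     "rus": "ru",
--     "russian": "ru",
--     "ar": "ar",
--     "ara": "ar",
--     "arabic": "ar",
--     "hi": "hi",
--     "hin": "hi",
--     "hindi": "hi",
--     "no": "no",
--     "nor": "no",
--     "norwegian": "no",
--     "da": "da",
--     "dan": "da",
--     "danish": "da",
--     "fi": "fi",
--     "fin": "fi",
--     "finnish": "fi",
--     "pl": "pl",
--     "pol": "pl",
--     "polish": "pl",
--     "cs": "cs",
--     "ces": "cs",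
--     "cze": "cs",
--     "czech": "cs",
--     "tr": "tr",
--     "tur": "tr",
--     "turkish": "tr",
--     "he": "he",
--     "heb": "he",
--     "hebrew": "he",
--     "th": "th",
--     "tha": "th",
--     "thai": "th",
--     "vi": "vi",
--     "vie": "vi",
--     "vietnamese": "vi",
--     "el": "el",
--     "ell": "el",
--     "gre": "el",
--     "greek": "el",
-- }
--
--
-- def _languages_equivalent(a: str, b: str) -> bool:
--     """True if a and b refer to the same language under ISO 639-1/2 conventions."""
--     a, b = a.lower().strip(), b.lower().strip()
--     if not a or not b or a in {"und", "unk"} or b in {"und", "unk"}: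
--         return False
--     return _CODE_TO_LANG.get(a, a) == _CODE_TO_LANG.get(b, b)
-- ===== Notes on version B (the rewrite author's own statement) =====
-- stated objective: idiomatic
-- what changed: Replaced the bucket-scanning loop plus the a == b early return with a flat canonicalization map (code -> canonical language) applied once to each side; equivalence is a single comparison of the two canonical forms.
import Mathlib
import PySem

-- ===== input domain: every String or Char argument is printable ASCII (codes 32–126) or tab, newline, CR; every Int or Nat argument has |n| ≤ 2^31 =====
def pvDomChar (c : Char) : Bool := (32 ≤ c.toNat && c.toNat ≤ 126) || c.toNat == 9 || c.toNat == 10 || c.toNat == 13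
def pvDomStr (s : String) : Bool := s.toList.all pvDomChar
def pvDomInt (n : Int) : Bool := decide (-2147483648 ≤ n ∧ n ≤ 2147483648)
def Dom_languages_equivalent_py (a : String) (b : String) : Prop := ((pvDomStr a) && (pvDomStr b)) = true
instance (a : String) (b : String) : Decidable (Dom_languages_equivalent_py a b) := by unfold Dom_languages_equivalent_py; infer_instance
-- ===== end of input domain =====

-- B replaces A's per-call scan over all equivalence buckets (plus the a == b early return)
-- by a flat canonicalization map applied once to each side: equivalent iff the two
-- canonical forms coincide (idiomatic).

-- ===== PORT A =====
-- the values of _ISO1_EQUIV, in insertion order (A only iterates over .values())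
def iso1Buckets : List (List String) :=
  [["en", "eng", "english"],
   ["sv", "swe", "swedish"],
   ["nl", "nld", "dut", "dutch"],
   ["de", "deu", "ger", "german"],
   ["fr", "fra", "fre", "french"],
   ["es", "spa", "spanish"],
   ["it", "ita", "italian"],
   ["ja", "jpn", "japanese"],
   ["ko", "kor", "korean"],
   ["zh", "cn", "chi", "zho", "yue", "cmn", "chinese", "mandarin", "cantonese"],
   ["pt", "por", "portuguese"],
   ["ru", "rus", "russian"],
   ["ar", "ara", "arabic"],
   ["hi", "hin", "hindi"],
   ["no", "nor", "norwegian"],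
   ["da", "dan", "danish"],
   ["fi", "fin", "finnish"],
   ["pl", "pol", "polish"],
   ["cs", "ces", "cze", "czech"],
   ["tr", "tur", "turkish"],
   ["he", "heb", "hebrew"],
   ["th", "tha", "thai"],
   ["vi", "vie", "vietnamese"],
   ["el", "ell", "gre", "greek"]]

-- the bucket-scanning loop of A
def bucketScan (a b : String) : Bool :=
  iso1Buckets.any (fun codes => codes.contains a && codes.contains b)

def languages_equivalent_py (a : String) (b : String) : Bool :=
  let a := PySem.Str.strip (PySem.Str.lower a)
  let b := PySem.Str.strip (PySem.Str.lower b)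
  if a == "" || b == "" || a == "und" || a == "unk" || b == "und" || b == "unk" then false
  else if a == b then true
  else bucketScan a b

-- ===== PORT B =====
-- B's flat table _CODE_TO_LANG: code -> canonical language, written out directly
-- (a Python dict literal with distinct keys; first-match lookup = dict.get)
def codeToLang : List (String × String) :=
  [("en", "en"),
   ("eng", "en"),
   ("english", "en"),
   ("sv", "sv"),
   ("swe", "sv"),
   ("swedish", "sv"),
   ("nl", "nl"),
   ("nld", "nl"),
   ("dut", "nl"),
   ("dutch", "nl"),
   ("de", "de"),
   ("deu", "de"),
   ("ger", "de"),
   ("german", "de"),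
   ("fr", "fr"),
   ("fra", "fr"),
   ("fre", "fr"),
   ("french", "fr"),
   ("es", "es"),
   ("spa", "es"),
   ("spanish", "es"),
   ("it", "it"),
   ("ita", "it"),
   ("italian", "it"),
   ("ja", "ja"),
   ("jpn", "ja"),
   ("japanese", "ja"),
   ("ko", "ko"),
   ("kor", "ko"),
   ("korean", "ko"),
   ("zh", "zh"),
   ("cn", "zh"),
   ("chi", "zh"),
   ("zho", "zh"),
   ("yue", "zh"),
   ("cmn", "zh"),
   ("chinese", "zh"),
   ("mandarin", "zh"),
   ("cantonese", "zh"),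
   ("pt", "pt"),
   ("por", "pt"),
   ("portuguese", "pt"),
   ("ru", "ru"),
   ("rus", "ru"),
   ("russian", "ru"),
   ("ar", "ar"),
   ("ara", "ar"),
   ("arabic", "ar"),
   ("hi", "hi"),
   ("hin", "hi"),
   ("hindi", "hi"),
   ("no", "no"),
   ("nor", "no"),
   ("norwegian", "no"),
   ("da", "da"),
   ("dan", "da"),
   ("danish", "da"),
   ("fi", "fi"),
   ("fin", "fi"),
   ("finnish", "fi"),
   ("pl", "pl"),
   ("pol", "pl"),
   ("polish", "pl"),
   ("cs", "cs"),
   ("ces", "cs"),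
   ("cze", "cs"),
   ("czech", "cs"),
   ("tr", "tr"),
   ("tur", "tr"),
   ("turkish", "tr"),
   ("he", "he"),
   ("heb", "he"),
   ("hebrew", "he"),
   ("th", "th"),
   ("tha", "th"),
   ("thai", "th"),
   ("vi", "vi"),
   ("vie", "vi"),
   ("vietnamese", "vi"),
   ("el", "el"),
   ("ell", "el"),
   ("gre", "el"),
   ("greek", "el")]

-- _CODE_TO_LANG.get(x, x)
def canonOf (x : String) : String := (codeToLang.lookup x).getD x

def languages_equivalent_py_alt (a : String) (b : String) : Bool :=
  let a := PySem.Str.strip (PySem.Str.lower a)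
  let b := PySem.Str.strip (PySem.Str.lower b)
  if a == "" || b == "" || a == "und" || a == "unk" || b == "und" || b == "unk" then false
  else canonOf a == canonOf b

-- ===== PRECONDITION & SPEC =====
def Spec_languages_equivalent_py (a : String) (b : String) (out : Bool) : Prop := out = languages_equivalent_py_alt a b
instance (a : String) (b : String) (out : Bool) : Decidable (Spec_languages_equivalent_py a b out) := by unfold Spec_languages_equivalent_py; infer_instance

-- ===== CLAIM =====
def Claim_equal_languages_equivalent_py : Prop := ∀ (a : String) (b : String), Dom_languages_equivalent_py a b → Spec_languages_equivalent_py a b (languages_equivalent_py a b)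

-- ===== LEMMAS AND PROOFS =====

-- the keys of the canonicalization map
def allCodes : List String := codeToLang.map Prod.fst

theorem lookup_none_of_not_mem {x : String} (h : x ∉ allCodes) :
    codeToLang.lookup x = none := by
  revert h
  show x ∉ codeToLang.map Prod.fst → codeToLang.lookup x = none
  induction codeToLang with
  | nil => intro _; rfl
  | cons p l ih =>
    intro h
    simp only [List.map_cons, List.mem_cons, not_or] at h
    simp only [List.lookup]
    have : (x == p.1) = false := by
      cases hbe : x == p.1
      · rfl
      · exact absurd (eq_of_beq hbe) h.1
    rw [this]
    exact ih h.2

theorem mem_of_lookup_some {l : List (String × String)} {y c : String}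
    (h : l.lookup y = some c) : (y, c) ∈ l := by
  induction l with
  | nil => simp [List.lookup] at h
  | cons p t ih =>
    simp only [List.lookup] at h
    cases hbe : y == p.1 with
    | true =>
      rw [hbe] at h
      have : p = (y, c) := by
        cases p; cases (eq_of_beq hbe); cases h; rfl
      exact this ▸ List.mem_cons_self ..
    | false =>
      rw [hbe] at h
      exact List.mem_cons_of_mem _ (ih h)

-- every code occurring in A's buckets is a key of B's map
theorem buckets_sub : ∀ codes ∈ iso1Buckets, ∀ c ∈ codes, c ∈ allCodes := by decide

-- every canonical value of B's map is itself a key of the map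
theorem canon_mem : ∀ p ∈ codeToLang, p.2 ∈ allCodes := by decide

set_option maxRecDepth 100000 in
theorem core_on_codes : ∀ x ∈ allCodes, ∀ y ∈ allCodes,
    bucketScan x y = (canonOf x == canonOf y) := by
  decide

theorem bucketScan_false_left {x : String} (h : x ∉ allCodes) (y : String) :
    bucketScan x y = false := by
  unfold bucketScan
  rw [List.any_eq_false]
  intro codes hc
  simp only [Bool.and_eq_true, List.contains_iff_mem, not_and]
  intro hxm _
  exact (h (buckets_sub codes hc x hxm)).elim

theorem bucketScan_false_right (x : String) {y : String} (h : y ∉ allCodes) :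
    bucketScan x y = false := by
  unfold bucketScan
  rw [List.any_eq_false]
  intro codes hc
  simp only [Bool.and_eq_true, List.contains_iff_mem, not_and]
  intro _ hym
  exact h (buckets_sub codes hc y hym)

-- canonOf of a non-key is the input itself
theorem canonOf_not_mem {x : String} (h : x ∉ allCodes) : canonOf x = x := by
  unfold canonOf
  rw [lookup_none_of_not_mem h]
  rfl

-- canonOf of a key is a key
theorem canonOf_mem_of_mem {x : String} (h : x ∈ allCodes) : canonOf x ∈ allCodes := by
  unfold canonOf
  cases hl : codeToLang.lookup x with
  | none => exact h
  | some c => exact canon_mem _ (mem_of_lookup_some hl)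

-- the core equality on distinct inputs
theorem core_eq {x y : String} (hne : x ≠ y) :
    bucketScan x y = (canonOf x == canonOf y) := by
  by_cases hx : x ∈ allCodes
  · by_cases hy : y ∈ allCodes
    · exact core_on_codes x hx y hy
    · rw [bucketScan_false_right x hy, canonOf_not_mem hy]
      cases hce : canonOf x == y with
      | false => rfl
      | true => exact (hy ((eq_of_beq hce) ▸ canonOf_mem_of_mem hx)).elim
  · rw [bucketScan_false_left hx y, canonOf_not_mem hx]
    by_cases hy : y ∈ allCodes
    · cases hce : x == canonOf y with
      | false => rfl
      | true => exact (hx ((eq_of_beq hce) ▸ canonOf_mem_of_mem hy)).elim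
    · rw [canonOf_not_mem hy]
      cases hce : x == y with
      | false => rfl
      | true => exact (hne (eq_of_beq hce)).elim

-- ===== VERDICT =====
theorem languages_equivalent_py_spec : Claim_equal_languages_equivalent_py := by
  intro a b _
  unfold Spec_languages_equivalent_py languages_equivalent_py languages_equivalent_py_alt
  set x := PySem.Str.strip (PySem.Str.lower a) with hx
  set y := PySem.Str.strip (PySem.Str.lower b) with hy
  cases hguard : (x == "" || y == "" || x == "und" || x == "unk" || y == "und" || y == "unk") with
  | true => simp only [hguard, if_true]
  | false =>
    simp only [hguard, Bool.false_eq_true, if_false]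
    by_cases heq : x = y
    · rw [if_pos (by simpa using heq), heq]; exact (beq_self_eq_true (canonOf y)).symm
    · rw [if_neg (by simpa using heq)]
      exact core_eq heq
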